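-- pv_equiv track=rewrite | github.com/shyang0419/property_control | 4.repeater(analysis).py | change_na_column1
-- ===== SOURCE A (Python) =====
-- def change_na_column1(value):
--     list0 = value
--     j=''
--     n=-1
--     for i in list0:
--         n=n+1
--         if i==j:
--             list0[n]=''
--         else:
--             j=i
--     return list0
-- ===== SOURCE B (Python) =====
-- # B: two-level run scanner — outer loop jumps from run head to run head,
-- # inner loop blanks the tail of each maximal run of equal elements (same in-place mutation as A).
-- def change_na_column1(value):
--     n = len(value)
--     i = 0
--     while i < n:
--         head = value[i]
--         j = i + 1
--         while j < n and value[j] == head: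
--             value[j] = ''
--             j += 1
--         i = j
--     return value
-- ===== Notes on version B (the rewrite author's own statement) =====
-- stated objective: alternative
-- what changed: Replaces A's single element-wise pass carrying a sentinel variable j with a two-level run scanner: an outer loop jumps from run head to run head while an inner loop blanks the remaining elements of each maximal run of consecutive equal values.
import Mathlib
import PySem

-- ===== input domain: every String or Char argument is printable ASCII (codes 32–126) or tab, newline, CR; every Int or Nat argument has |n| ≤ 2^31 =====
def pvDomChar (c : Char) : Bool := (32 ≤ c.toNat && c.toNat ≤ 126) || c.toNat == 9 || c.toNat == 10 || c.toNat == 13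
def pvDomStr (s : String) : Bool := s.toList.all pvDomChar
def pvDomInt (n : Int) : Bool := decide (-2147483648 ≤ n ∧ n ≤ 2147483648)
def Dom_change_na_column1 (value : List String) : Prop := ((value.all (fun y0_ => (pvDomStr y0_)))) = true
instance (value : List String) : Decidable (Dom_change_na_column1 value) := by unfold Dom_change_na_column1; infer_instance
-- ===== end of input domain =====

-- B replaces A's sentinel-variable single pass by a two-level run scanner (alternative decomposition);
-- both Pythons mutate the argument list in place: the equivalence proved here is about the return value.

-- ===== PORT A =====
-- one step of A's for-loop: state is (list0, j, n)
def pvStepA (st : List String × String × Int) (i : String) : List String × String × Int :=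
  let n := st.2.2 + 1
  if i == st.2.1 then
    -- list0[n] = '' : n is the current iteration index, always in range, so pySetD is exact here
    (PySem.List.pySetD st.1 n "", st.2.1, n)
  else
    (st.1, i, n)

def change_na_column1 (value : List String) : List String :=
  (value.foldl pvStepA (value, "", -1)).1

-- ===== PORT B =====
-- inner while loop: while j < n and value[j] == head: value[j] = ''; j += 1
-- (value[j] is always in range here since j < n = len(value), so List.set/getD are exact)
def pvInnerB (v : List String) (head : String) (n : Nat) (j : Nat) : List String × Nat :=
  if h : j < n ∧ (v.getD j "") == head then
    pvInnerB (v.set j "") head n (j + 1)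
  else (v, j)
termination_by n - j
decreasing_by omega

-- the inner loop only moves j forward (needed for the outer loop's termination)
theorem pvInnerB_ge (v : List String) (head : String) (n j : Nat) :
    j ≤ (pvInnerB v head n j).2 := by
  fun_induction pvInnerB with
  | case1 h ih => omega
  | case2 h => simp

-- outer while loop: while i < n: head = value[i]; j = i+1; <inner>; i = j
def pvOuterB (n : Nat) (v : List String) (i : Nat) : List String :=
  if h : i < n then
    let r := pvInnerB v (v.getD i "") n (i + 1)
    pvOuterB n r.1 r.2
  else v
termination_by n - i
decreasing_by
  have := pvInnerB_ge v (v.getD i "") n (i + 1)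
  omega

def change_na_column1_alt (value : List String) : List String :=
  pvOuterB value.length value 0

-- ===== PRECONDITION & SPEC =====
def Spec_change_na_column1 (value : List String) (out : List String) : Prop := out = change_na_column1_alt value
instance (value : List String) (out : List String) : Decidable (Spec_change_na_column1 value out) := by unfold Spec_change_na_column1; infer_instance

-- ===== CLAIM (what is proved, stated in full; the proofs are below) =====
def Claim_equal_change_na_column1 : Prop := ∀ (value : List String), Dom_change_na_column1 value → Spec_change_na_column1 value (change_na_column1 value)

-- ===== LEMMAS AND PROOFS =====

-- what A's loop computes: blank each element equal to the previous kept sentinel j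
def pvBlanks (j : String) : List String → List String
  | [] => []
  | x :: t => (if x == j then "" else x) :: pvBlanks x t

-- number of leading elements of t equal to head
def pvLead (head : String) : List String → Nat
  | [] => 0
  | x :: t => if x == head then pvLead head t + 1 else 0

theorem pv_set_append (pre t : List String) (x v : String) :
    (pre ++ x :: t).set pre.length v = pre ++ v :: t := by
  induction pre with
  | nil => simp
  | cons a pre ih => simp [ih]

theorem pv_getD_append (pre t : List String) (x d : String) :
    (pre ++ x :: t).getD pre.length d = x := by
  induction pre with
  | nil => simp
  | cons a pre ih => simpa using ih

theorem pv_foldlA (xs : List String) : ∀ (pre : List String) (j : String),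
    (List.foldl pvStepA (pre ++ xs, j, (pre.length : Int) - 1) xs).1 = pre ++ pvBlanks j xs := by
  induction xs with
  | nil => intro pre j; simp [pvBlanks]
  | cons x t ih =>
    intro pre j
    simp only [List.foldl_cons, pvStepA, pvBlanks]
    by_cases h : x = j
    · subst h
      simp only [beq_self_eq_true, if_true]
      have hset : PySem.List.pySetD (pre ++ x :: t) ((pre.length : Int) - 1 + 1) "" = pre ++ "" :: t := by
        have heq : ((pre.length : Int) - 1 + 1) = ((pre.length : Nat) : Int) := by omega
        rw [heq, PySem.List.pySetD_natCast, pv_set_append]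
      rw [hset]
      have h2 := ih (pre ++ [""]) x
      simp only [List.append_assoc, List.singleton_append, List.length_append,
        List.length_singleton] at h2
      have heq2 : ((pre.length : Int) - 1 + 1) = ((pre.length + 1 : Nat) : Int) - 1 := by push_cast; omega
      rw [heq2]
      exact h2.trans (by simp [pvBlanks])
    · simp only [beq_iff_eq, h, if_false]
      have h2 := ih (pre ++ [x]) x
      simp only [List.append_assoc, List.singleton_append, List.length_append,
        List.length_singleton] at h2
      have heq2 : ((pre.length : Int) - 1 + 1) = ((pre.length + 1 : Nat) : Int) - 1 := by push_cast; omega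
      rw [heq2]
      exact h2.trans (by simp [pvBlanks])

theorem pv_lead_le (head : String) (t : List String) : pvLead head t ≤ t.length := by
  induction t with
  | nil => simp [pvLead]
  | cons x t ih => simp only [pvLead]; split <;> simp <;> omega

-- B's inner loop blanks exactly the leading run equal to head
theorem pv_innerB (t : List String) : ∀ (pre : List String) (head : String),
    pvInnerB (pre ++ t) head (pre.length + t.length) pre.length =
      (pre ++ List.replicate (pvLead head t) "" ++ t.drop (pvLead head t),
       pre.length + pvLead head t) := by
  induction t with
  | nil => intro pre head; rw [pvInnerB]; simp [pvLead]
  | cons x t ih =>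
    intro pre head
    rw [pvInnerB]
    have hget : (pre ++ x :: t).getD pre.length "" = x := pv_getD_append pre t x ""
    by_cases hx : x = head
    · subst hx
      have hcond : pre.length < pre.length + (x :: t).length ∧ ((pre ++ x :: t).getD pre.length "" == x) = true := by
        constructor
        · simp
        · rw [hget]; simp
      rw [dif_pos hcond]
      rw [pv_set_append]
      have h2 := ih (pre ++ [""]) x
      simp only [List.append_assoc, List.singleton_append, List.length_append,
        List.length_singleton] at h2
      have hlen : pre.length + (x :: t).length = pre.length + 1 + t.length := by simp; omega
      rw [hlen, h2]
      simp only [pvLead, beq_self_eq_true, if_true]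
      rw [Prod.mk.injEq]
      constructor
      · simp [List.replicate_succ]
      · omega
    · have hcond : ¬ (pre.length < pre.length + (x :: t).length ∧ ((pre ++ x :: t).getD pre.length "" == head) = true) := by
        rw [hget]; simp [hx]
      rw [dif_neg hcond]
      simp [pvLead, hx]

-- pvBlanks decomposes along the leading run
theorem pv_blanks_lead (t : List String) (x : String) :
    pvBlanks x t = List.replicate (pvLead x t) "" ++
      (match t.drop (pvLead x t) with
       | [] => []
       | y :: r => y :: pvBlanks y r) := by
  induction t generalizing x with
  | nil => simp [pvBlanks, pvLead]
  | cons y t ih =>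
    by_cases h : y = x
    · subst h
      simp only [pvBlanks, pvLead, beq_self_eq_true, if_true, List.replicate_succ]
      simpa using ih y
    · simp [pvBlanks, pvLead, h]

-- B's outer loop, started at a run head, produces exactly A's blanking of the tail
theorem pv_outerB : ∀ (m : Nat) (t : List String), t.length ≤ m → ∀ (pre : List String) (x : String),
    pvOuterB (pre.length + 1 + t.length) (pre ++ x :: t) pre.length = pre ++ x :: pvBlanks x t := by
  intro m
  induction m with
  | zero =>
    intro t ht pre x
    have ht0 : t = [] := List.eq_nil_of_length_eq_zero (by omega)
    subst ht0
    rw [pvOuterB, dif_pos (by simp)]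
    rw [pv_getD_append]
    have hinner := pv_innerB ([] : List String) (pre ++ [x]) x
    simp only [List.length_append, List.length_nil, List.append_nil, List.length_singleton,
      pvLead, List.replicate, List.drop_nil, Nat.add_zero] at hinner
    simp only [List.length_nil, Nat.add_zero, List.append_assoc, List.singleton_append] at *
    rw [hinner]
    rw [pvOuterB, dif_neg (by simp)]
    simp [pvBlanks]
  | succ m ih =>
    intro t ht pre x
    rw [pvOuterB, dif_pos (by omega)]
    rw [pv_getD_append]
    have hinner := pv_innerB t (pre ++ [x]) x
    simp only [List.length_append, List.length_singleton] at hinner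
    simp only [List.append_assoc, List.singleton_append] at hinner
    rw [hinner]
    set k := pvLead x t with hk
    have hkle : k ≤ t.length := pv_lead_le x t
    rcases hdrop : t.drop k with _ | ⟨y, r⟩
    · -- run reaches the end of the list: j = n, outer loop stops
      have hkeq : t.length ≤ k := List.drop_eq_nil_iff.mp hdrop
      show pvOuterB (pre.length + 1 + t.length)
        (pre ++ (x :: (List.replicate k "" ++ []))) (pre.length + 1 + k) = pre ++ x :: pvBlanks x t
      rw [pvOuterB, dif_neg (by omega)]
      rw [pv_blanks_lead t x, ← hk, hdrop]
    · -- next run head y found at index pre.length+1+k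
      have hklt : k < t.length := by
        by_contra hc
        have : t.drop k = [] := List.drop_eq_nil_iff.mpr (by omega)
        rw [hdrop] at this; simp at this
      have hr : r.length + 1 = t.length - k := by
        have hld := List.length_drop (l := t) (i := k)
        rw [hdrop] at hld; simpa using hld
      show pvOuterB (pre.length + 1 + t.length)
        (pre ++ (x :: (List.replicate k "" ++ y :: r))) (pre.length + 1 + k) = pre ++ x :: pvBlanks x t
      have h2 := ih r (by omega) (pre ++ x :: List.replicate k "") y
      have hlen : (pre ++ x :: List.replicate k "").length = pre.length + 1 + k := by
        simp [List.length_append]; omega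
      rw [hlen] at h2
      have h3 : (pre ++ x :: List.replicate k "") ++ y :: r
          = pre ++ (x :: (List.replicate k "" ++ y :: r)) := by simp
      rw [h3] at h2
      have hnn : pre.length + 1 + k + 1 + r.length = pre.length + 1 + t.length := by omega
      rw [hnn] at h2
      rw [h2]
      rw [pv_blanks_lead t x, ← hk, hdrop]
      simp

-- ===== VERDICT (by name: the statement is the Claim_ definition above) =====
theorem change_na_column1_spec : Claim_equal_change_na_column1 := by
  intro value _
  show change_na_column1 value = change_na_column1_alt value
  have hA : change_na_column1 value = pvBlanks "" value := by
    have := pv_foldlA value [] ""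
    simpa [change_na_column1] using this
  cases value with
  | nil =>
    rw [hA]
    rw [change_na_column1_alt, pvOuterB, dif_neg (by simp)]
    simp [pvBlanks]
  | cons x t =>
    rw [hA, change_na_column1_alt]
    have h := pv_outerB t.length t le_rfl [] x
    simp only [List.length_nil, List.nil_append, Nat.zero_add] at h
    have hn : (x :: t).length = 0 + 1 + t.length := by simp; omega
    rw [hn, h]
    simp only [pvBlanks]
    by_cases hx : x = "" <;> simp [hx]
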